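-- pv_equiv track=rewrite | github.com/marivasi5/GWAS_python_projectara | EM.py | diplotupoi
-- ===== SOURCE A (Python) =====
-- def diplotupoi(snplist):
--     '''Ypologismos twn diplotupwn pou xreiazontai gia na pragmatopoih8ei to haplotype estimation wste na upologistei to LD 2 thesewn
--     Input: lista me 2 antikeimena: grammes twn 2 thesewn se Genotype File Format
--     Output: ???????????????????????'''
--     snpA, snpB=snplist
--     snpA_splitted=snpA.split(' ')
--     snpB_splitted=snpB.split(' ')
--     RR=0 ; Rh=0 ;
--     hR=0 ; hh=0 ;
--
--     for i in range(5, len(snpA_splitted) -len(snpA_splitted)%3 ,3):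
--         #oi gonotupoi tou kathe atomou stis 2 theseis
--         a_individual= snpA_splitted[i] + snpA_splitted[i+1] + snpA_splitted[i+2]
--         b_individual= snpB_splitted[i] + snpB_splitted[i+1] + snpB_splitted[i+2]
--
--         #diplotupoi: to elegxw ana grammi
--         if a_individual == '100':
--             if b_individual == '100':
--                 RR+=1
--             elif b_individual == '010':
--                 Rh+=1
--         elif a_individual == '010':
--             if b_individual == '100':
--                 hR+=1
--             elif b_individual == '010':
--                 hh+=1
--     return RR, Rh, hR, hh
-- ===== SOURCE B (Python) =====
-- def diplotupoi(snplist):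
--     '''Chunk each line's fields (past the 5 header fields) into genotype triples with the
--     zip(*[iter]*3) idiom, pair them up, and read each diplotype count with list.count.'''
--     snpA, snpB = snplist
--     a = snpA.split(' ')[5:]
--     b = snpB.split(' ')[5:]
--     pairs = list(zip(map(''.join, zip(*[iter(a)] * 3)),
--                      map(''.join, zip(*[iter(b)] * 3))))
--     return (pairs.count(('100', '100')), pairs.count(('100', '010')),
--             pairs.count(('010', '100')), pairs.count(('010', '010')))
-- ===== Notes on version B (the rewrite author's own statement) =====
-- stated objective: idiomatic
-- what changed: B drops the index loop and the four nested-if counters entirely: it chunks each line's fields past the 5 header fields into genotype triples with the zip(*[iter]*3) idiom, zips the two triple streams into a pair list, and reads each of the four diplotype counts off with list.count.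
import Mathlib
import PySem

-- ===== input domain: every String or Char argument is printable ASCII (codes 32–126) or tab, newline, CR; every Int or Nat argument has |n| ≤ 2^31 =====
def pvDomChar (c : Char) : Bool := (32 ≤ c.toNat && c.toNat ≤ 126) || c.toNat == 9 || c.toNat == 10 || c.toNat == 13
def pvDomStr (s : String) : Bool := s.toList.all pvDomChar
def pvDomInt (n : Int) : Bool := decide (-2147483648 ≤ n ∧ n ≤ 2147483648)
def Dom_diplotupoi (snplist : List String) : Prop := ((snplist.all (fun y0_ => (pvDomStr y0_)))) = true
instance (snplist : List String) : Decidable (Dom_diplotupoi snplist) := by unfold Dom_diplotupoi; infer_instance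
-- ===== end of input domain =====

-- B replaces A's index loop with nested-if counters by chunk-into-triples / zip /
-- four list.count reads (objective: idiomatic, same cost).

-- ===== PORT A =====
def diplotupoi (snplist : List String) : Int × Int × Int × Int :=
  if snplist.length = 2 then
    let fa := (PySem.Str.split? (snplist.getD 0 "") " ").getD []
    let fb := (PySem.Str.split? (snplist.getD 1 "") " ").getD []
    let N : Int := PySem.List.len fa - PySem.Int.mod (PySem.List.len fa) 3
    (PySem.List.pyRange 5 N 3).foldl
      (fun st i =>
        let a := PySem.List.pyGetD fa i "" ++ PySem.List.pyGetD fa (i+1) "" ++ PySem.List.pyGetD fa (i+2) ""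
        let b := PySem.List.pyGetD fb i "" ++ PySem.List.pyGetD fb (i+1) "" ++ PySem.List.pyGetD fb (i+2) ""
        if a == "100" then
          if b == "100" then (st.1 + 1, st.2.1, st.2.2.1, st.2.2.2)
          else if b == "010" then (st.1, st.2.1 + 1, st.2.2.1, st.2.2.2)
          else st
        else if a == "010" then
          if b == "100" then (st.1, st.2.1, st.2.2.1 + 1, st.2.2.2)
          else if b == "010" then (st.1, st.2.1, st.2.2.1, st.2.2.2 + 1)
          else st
        else st)
      (0, 0, 0, 0)
  else (0, 0, 0, 0)

-- ===== PORT B =====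
-- zip(*[iter(xs)]*3) followed by ''.join: consume three fields at a time while three remain
def pvChunks (xs : List String) : List String :=
  match xs with
  | x :: y :: z :: rest => PySem.Str.join "" [x, y, z] :: pvChunks rest
  | _ => []

def diplotupoi_alt (snplist : List String) : Int × Int × Int × Int :=
  if snplist.length = 2 then
    let a := PySem.List.slice ((PySem.Str.split? (snplist.getD 0 "") " ").getD []) (some 5) none
    let b := PySem.List.slice ((PySem.Str.split? (snplist.getD 1 "") " ").getD []) (some 5) none
    let pairs := (pvChunks a).zip (pvChunks b)
    ((pairs.count ("100", "100") : Int), (pairs.count ("100", "010") : Int),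
     (pairs.count ("010", "100") : Int), (pairs.count ("010", "010") : Int))
  else (0, 0, 0, 0)

-- ===== PRECONDITION & SPEC =====
-- Pre_ excludes exactly the inputs on which A raises: a list whose length is not 2
-- (unpacking ValueError), and field counts on which the slicing loop indexes past the
-- end of one of the two lines (IndexError): A returns normally iff the first line has
-- la ≤ 5 space-separated fields (empty loop) or la % 3 = 2 with the second line at
-- least as long.
def Pre_diplotupoi (snplist : List String) : Prop :=
  snplist.length = 2 ∧
  (((PySem.Str.split? (snplist.getD 0 "") " ").getD []).length ≤ 5 ∨
   (((PySem.Str.split? (snplist.getD 0 "") " ").getD []).length % 3 = 2 ∧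
    ((PySem.Str.split? (snplist.getD 0 "") " ").getD []).length ≤
      ((PySem.Str.split? (snplist.getD 1 "") " ").getD []).length))
instance (snplist : List String) : Decidable (Pre_diplotupoi snplist) := by
  unfold Pre_diplotupoi; infer_instance

def pvWitness_diplotupoi : List String :=
  ["1 rs1 1 0 1 1 0 0", "1 rs1 1 0 1 0 1 0"]

def Spec_diplotupoi (snplist : List String) (out : Int × Int × Int × Int) : Prop := out = diplotupoi_alt snplist
instance (snplist : List String) (out : Int × Int × Int × Int) : Decidable (Spec_diplotupoi snplist out) := by unfold Spec_diplotupoi; infer_instance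

-- ===== CLAIM (what is proved, stated in full; the proofs are below) =====
def Claim_equal_diplotupoi : Prop := ∀ (snplist : List String), Dom_diplotupoi snplist → Pre_diplotupoi snplist → Spec_diplotupoi snplist (diplotupoi snplist)

-- ===== LEMMAS AND PROOFS =====

def pvStep (st : Int × Int × Int × Int) (p : String × String) : Int × Int × Int × Int :=
  if p.1 == "100" then
    if p.2 == "100" then (st.1 + 1, st.2.1, st.2.2.1, st.2.2.2)
    else if p.2 == "010" then (st.1, st.2.1 + 1, st.2.2.1, st.2.2.2)
    else st
  else if p.1 == "010" then
    if p.2 == "100" then (st.1, st.2.1, st.2.2.1 + 1, st.2.2.2)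
    else if p.2 == "010" then (st.1, st.2.1, st.2.2.1, st.2.2.2 + 1)
    else st
  else st

lemma pvStep_counts (ps : List (String × String)) : ∀ rr rh hr hh : Int,
    ps.foldl pvStep (rr, rh, hr, hh)
      = (rr + ps.count ("100","100"), rh + ps.count ("100","010"),
         hr + ps.count ("010","100"), hh + ps.count ("010","010")) := by
  induction ps with
  | nil => intro rr rh hr hh; simp
  | cons p t ih =>
    intro rr rh hr hh
    obtain ⟨x, y⟩ := p
    rw [List.foldl_cons]
    simp only [pvStep, beq_iff_eq]
    split_ifs with h1 h2 h3 h4 h5 h6 <;>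
      · rw [ih]
        simp_all [Prod.ext_iff]
        try omega

def pvJoin3 (xs : List String) (k : Nat) : String :=
  xs.getD (3*k) "" ++ xs.getD (3*k+1) "" ++ xs.getD (3*k+2) ""

def pvPair (fa fb : List String) (k : Nat) : String × String :=
  (fa.getD (5+3*k) "" ++ fa.getD (5+3*k+1) "" ++ fa.getD (5+3*k+2) "",
   fb.getD (5+3*k) "" ++ fb.getD (5+3*k+1) "" ++ fb.getD (5+3*k+2) "")

lemma join3 (x y z : String) : PySem.Str.join "" [x, y, z] = x ++ y ++ z := by
  apply String.toList_inj.mp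
  rw [PySem.Str.toList_join]
  simp [PySem.Chars.join_cons_cons, PySem.Chars.join_singleton, String.toList_append]

-- the zipped chunk lists, indexed
lemma chunks_zip : ∀ (u v : List String),
    (pvChunks u).zip (pvChunks v)
      = (List.range (min (u.length / 3) (v.length / 3))).map
          (fun k => (pvJoin3 u k, pvJoin3 v k)) := by
  intro u
  induction u using pvChunks.induct with
  | case1 x y z u' ih =>
    intro v
    match v with
    | a :: b :: c :: v' =>
      have h1 : (x :: y :: z :: u').length / 3 = u'.length / 3 + 1 := by
        simp [List.length_cons]; omega
      have h2 : (a :: b :: c :: v').length / 3 = v'.length / 3 + 1 := by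
        simp [List.length_cons]; omega
      rw [h1, h2,
        show min (u'.length/3+1) (v'.length/3+1) = min (u'.length/3) (v'.length/3) + 1
          from Nat.succ_min_succ _ _,
        List.range_succ_eq_map]
      simp only [pvChunks, List.zip_cons_cons, List.map_cons, List.map_map, ih]
      congr 1
      simp [pvJoin3, join3]
    | [] => simp [pvChunks]
    | [a] => simp [pvChunks]
    | [a, b] => simp [pvChunks]
  | case2 u' hne =>
    intro v
    have hch : pvChunks u' = [] := by
      match u', hne with
      | [], _ => rfl
      | [x], _ => rfl
      | [x, y], _ => rfl
      | x :: y :: z :: r, h => exact absurd rfl (h x y z r)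
    have hlen : u'.length / 3 = 0 := by
      match u', hne with
      | [], _ => simp
      | [x], _ => simp
      | [x, y], _ => simp
      | x :: y :: z :: r, h => exact absurd rfl (h x y z r)
    simp [hch, hlen]

-- main core lemma
lemma core (fa fb : List String)
    (hcase : fa.length ≤ 5 ∨ (fa.length % 3 = 2 ∧ fa.length ≤ fb.length)) :
    (PySem.List.pyRange 5 (PySem.List.len fa - PySem.Int.mod (PySem.List.len fa) 3) 3).foldl
      (fun st i =>
        let a := PySem.List.pyGetD fa i "" ++ PySem.List.pyGetD fa (i+1) "" ++ PySem.List.pyGetD fa (i+2) ""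
        let b := PySem.List.pyGetD fb i "" ++ PySem.List.pyGetD fb (i+1) "" ++ PySem.List.pyGetD fb (i+2) ""
        if a == "100" then
          if b == "100" then (st.1 + 1, st.2.1, st.2.2.1, st.2.2.2)
          else if b == "010" then (st.1, st.2.1 + 1, st.2.2.1, st.2.2.2)
          else st
        else if a == "010" then
          if b == "100" then (st.1, st.2.1, st.2.2.1 + 1, st.2.2.2)
          else if b == "010" then (st.1, st.2.1, st.2.2.1, st.2.2.2 + 1)
          else st
        else st)
      ((0 : Int), (0 : Int), (0 : Int), (0 : Int))
    = (let pairs := (pvChunks (PySem.List.slice fa (some 5) none)).zip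
                      (pvChunks (PySem.List.slice fb (some 5) none))
       ((pairs.count ("100", "100") : Int), (pairs.count ("100", "010") : Int),
        (pairs.count ("010", "100") : Int), (pairs.count ("010", "010") : Int))) := by
  simp only [PySem.List.len_eq]
  set la := fa.length with hla
  rw [show PySem.Int.mod ((la:Int)) 3 = ((la % 3 : Nat) : Int) by
    exact_mod_cast PySem.Int.mod_natCast la 3]
  set m : Nat := if 5 < la then (la - 5) / 3 else 0 with hm
  -- A's index list
  have hmA : PySem.List.pyRange 5 ((la:Int) - ((la % 3 : Nat) : Int)) 3
      = (List.range m).map (fun k : Nat => 5 + 3 * (k:Int)) := by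
    rw [PySem.List.pyRange_of_pos _ _ (by norm_num)]
    have : (if (5:Int) < (la:Int) - ((la % 3 : Nat) : Int)
        then (((la:Int) - ((la % 3 : Nat) : Int) - 5 + 3 - 1) / 3).toNat else 0) = m := by
      rcases hcase with h | ⟨h3, hlb⟩ <;> simp only [hm] <;> split_ifs <;> omega
    rw [this]
  rw [hmA, List.foldl_map]
  simp only [show ∀ k : Nat, (5 + 3*(k:Int)) = ((5+3*k : Nat) : Int) from fun k => by push_cast; ring,
    show ∀ k : Nat, ((5+3*k : Nat) : Int) + 1 = ((5+3*k+1 : Nat) : Int) from fun k => by push_cast; ring,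
    show ∀ k : Nat, ((5+3*k : Nat) : Int) + 2 = ((5+3*k+2 : Nat) : Int) from fun k => by push_cast; ring,
    PySem.List.pyGetD_natCast]
  change (List.range m).foldl (fun st k => pvStep st (pvPair fa fb k)) ((0:Int),(0:Int),(0:Int),(0:Int)) = _
  rw [← List.foldl_map (f := pvPair fa fb) (g := pvStep), pvStep_counts]
  -- B's pair list is the same list
  rw [PySem.List.slice_from, PySem.List.slice_from]
  rw [chunks_zip]
  have hmin : min ((fa.drop (5:Int).toNat).length / 3) ((fb.drop (5:Int).toNat).length / 3) = m := by
    simp only [List.length_drop, hm]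
    rcases hcase with h | ⟨h3, hlb⟩ <;> split_ifs <;> omega
  rw [hmin]
  have hmap : (List.range m).map (fun k => (pvJoin3 (fa.drop (5:Int).toNat) k, pvJoin3 (fb.drop (5:Int).toNat) k))
      = (List.range m).map (pvPair fa fb) := by
    apply List.map_congr_left
    intro k _
    simp [pvJoin3, pvPair, Nat.add_assoc]
  rw [hmap]
  simp
  all_goals norm_num

-- ===== VERDICT (by name: the statement is the Claim_ definition above) =====
theorem diplotupoi_spec : Claim_equal_diplotupoi := by
  intro snplist hdom hpre
  obtain ⟨hlen, hcase⟩ := hpre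
  unfold Spec_diplotupoi
  rw [diplotupoi, diplotupoi_alt, if_pos hlen, if_pos hlen]
  exact core _ _ hcase
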